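-- pv_equiv track=rewrite | github.com/AbdullZ7/ochDownloader | ochDownloader/core/utils/utils.py | url_unescape
-- ===== SOURCE A (Python) =====
-- def url_unescape(url):
--     entities = {
--         "&lt;": "<",
--         "&gt;": ">",
--         "&quot;": "\"",
--         # must do ampersand last
--         "&amp;": "&",
--     }
--
--     for k, v in entities.items():
--         url = url.replace(k, v)
--
--     return url
-- ===== SOURCE B (Python) =====
-- def url_unescape(url):
--     # single left-to-right scan over the string with an ordered entity table;
--     # never re-scans produced output, so '&amp;' semantics match doing it last
--     entities = (("&lt;", "<"), ("&gt;", ">"), ("&quot;", '"'), ("&amp;", "&"))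
--     out = []
--     i = 0
--     n = len(url)
--     while i < n:
--         if url[i] == "&":
--             for ent, ch in entities:
--                 if url.startswith(ent, i):
--                     out.append(ch)
--                     i += len(ent)
--                     break
--             else:
--                 out.append(url[i])
--                 i += 1
--         else:
--             out.append(url[i])
--             i += 1
--     return "".join(out)
-- ===== Notes on version B (the rewrite author's own statement) =====
-- stated objective: alternative
-- what changed: replaced four sequential whole-string replace passes (ampersand last) by a single left-to-right scan that consumes each entity once via an ordered table, never re-scanning its own output
import Mathlib
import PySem

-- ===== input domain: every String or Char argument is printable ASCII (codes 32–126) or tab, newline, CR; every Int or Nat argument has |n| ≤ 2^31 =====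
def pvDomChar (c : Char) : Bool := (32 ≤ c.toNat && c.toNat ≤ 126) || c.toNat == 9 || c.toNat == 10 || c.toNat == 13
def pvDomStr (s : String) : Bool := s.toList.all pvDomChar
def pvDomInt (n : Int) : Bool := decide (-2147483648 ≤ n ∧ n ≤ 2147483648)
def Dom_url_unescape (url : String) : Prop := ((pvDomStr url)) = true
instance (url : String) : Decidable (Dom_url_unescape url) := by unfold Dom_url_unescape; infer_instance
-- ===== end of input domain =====

-- B replaces A's four sequential whole-string replace passes by one left-to-right scan over an ordered entity table (alternative structure, same result).


-- ===== PORT A =====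
-- A builds the entity dict and replaces each key by its value over the whole string, in insertion order (ampersand last).
def url_unescape (url : String) : String :=
  let entities : PySem.Dict String String :=
    PySem.Dict.ofList [("&lt;", "<"), ("&gt;", ">"), ("&quot;", "\""), ("&amp;", "&")]
  entities.items.foldl (fun u kv => PySem.Str.replace u kv.1 kv.2) url

-- ===== PORT B =====
-- B scans once left to right; the for/break chain over the ordered entity table becomes this if-chain (hand port, exact).
def unescGo : List Char → List Char
  | [] => []
  | c :: t =>
    if c = '&' then
      if ['&','l','t',';'].isPrefixOf (c :: t) then '<' :: unescGo (t.drop 3)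
      else if ['&','g','t',';'].isPrefixOf (c :: t) then '>' :: unescGo (t.drop 3)
      else if ['&','q','u','o','t',';'].isPrefixOf (c :: t) then '"' :: unescGo (t.drop 5)
      else if ['&','a','m','p',';'].isPrefixOf (c :: t) then '&' :: unescGo (t.drop 4)
      else c :: unescGo t
    else c :: unescGo t
termination_by s => s.length
decreasing_by all_goals simp [List.length_drop]

def url_unescape_alt (url : String) : String :=
  String.ofList (unescGo url.toList)

-- ===== PRECONDITION & SPEC =====
def Spec_url_unescape (url : String) (out : String) : Prop := out = url_unescape_alt url
instance (url : String) (out : String) : Decidable (Spec_url_unescape url out) := by unfold Spec_url_unescape; infer_instance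

-- ===== CLAIM (what is proved, stated in full; the proofs are below) =====
def Claim_equal_url_unescape : Prop := ∀ (url : String), Dom_url_unescape url → Spec_url_unescape url (url_unescape url)

-- ===== LEMMAS AND PROOFS =====

-- pure single-replace function (leftmost, non-overlapping), used to characterise PySem.Chars.replace for a non-empty pattern
def rep (old new : List Char) (s : List Char) : List Char :=
  match s with
  | [] => []
  | c :: t =>
    if old ≠ [] ∧ old.isPrefixOf (c :: t) then new ++ rep old new ((c :: t).drop old.length)
    else c :: rep old new t
termination_by s.length
decreasing_by
  · simp only [List.length_drop]
    rename_i h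
    have : 0 < old.length := List.length_pos_iff.mpr h.1
    simp; omega
  · simp

theorem rep_step (old new : List Char) (c : Char) (t : List Char) (h : old ≠ []) (hp : old <+: (c :: t)) :
    rep old new (c :: t) = new ++ rep old new ((c :: t).drop old.length) := by
  conv_lhs => rw [rep.eq_def]
  simp [h, hp]

theorem rep_cons_neg (old new : List Char) (c : Char) (t : List Char)
    (hp : ¬ (old ≠ [] ∧ old <+: (c :: t))) : rep old new (c :: t) = c :: rep old new t := by
  conv_lhs => rw [rep.eq_def]
  simp only [List.isPrefixOf_iff_prefix]
  rw [if_neg hp]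

theorem rep_cons (old new : List Char) (c : Char) (t : List Char)
    (h : ¬ old.isPrefixOf (c :: t)) :
    rep old new (c :: t) = c :: rep old new t :=
  rep_cons_neg old new c t (fun hh => h (List.isPrefixOf_iff_prefix.mpr hh.2))

theorem go_eq_rep (old new : List Char) (h : old ≠ []) :
    ∀ (fuel : Nat) (l acc : List Char), l.length ≤ fuel →
      PySem.Chars.replace.go old new fuel l acc = acc.reverse ++ rep old new l := by
  intro fuel
  induction fuel with
  | zero =>
    intro l acc hl
    have : l = [] := List.eq_nil_of_length_eq_zero (Nat.le_zero.mp hl)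
    subst this
    simp [PySem.Chars.replace.go, rep]
  | succ n ih =>
    intro l acc hl
    match l with
    | [] => simp [PySem.Chars.replace.go, rep]
    | c :: t =>
      rw [PySem.Chars.replace.go]
      by_cases hp : old.isPrefixOf (c :: t)
      · have hlen : 0 < old.length := List.length_pos_iff.mpr h
        have hdrop : ((c :: t).drop old.length).length ≤ n := by
          simp only [List.length_drop]
          have h2 : t.length + 1 ≤ n + 1 := by simpa using hl
          have h3 : (c :: t).length = t.length + 1 := by simp
          omega
        simp only [hp, if_true]
        rw [ih _ _ hdrop]
        rw [rep_step old new c t h (List.isPrefixOf_iff_prefix.mp hp)]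
        simp
      · simp only [hp, if_false]
        rw [ih t (c :: acc) (by simpa [Nat.succ_le_succ_iff] using hl)]
        rw [rep_cons old new c t hp]
        simp

theorem replace_eq_rep (old new s : List Char) (h : old ≠ []) :
    PySem.Chars.replace s old new = rep old new s := by
  rw [PySem.Chars.replace]
  simp only [List.isEmpty_iff, h, if_false]
  simpa using go_eq_rep old new h s.length s [] le_rfl

theorem rep_nil (old new : List Char) : rep old new [] = [] := by rw [rep.eq_def]

theorem rep_pref (old new t : List Char) (h : old ≠ []) :
    rep old new (old ++ t) = new ++ rep old new t := by
  match old, h with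
  | o :: os, _ =>
    rw [rep.eq_def]
    have hp : (o :: os).isPrefixOf ((o :: os) ++ t) := by
      simp [List.isPrefixOf_iff_prefix]
    simp [hp]

-- pull a match back through a replace: if q shares no character with new, then q occurring
-- as a prefix of rep's output means it was already a prefix of the input
theorem rep_prefix_pullback (old new : List Char) (hnew : new ≠ []) :
    ∀ s q : List Char, (∀ ch ∈ new, ch ∉ q) → q <+: rep old new s → q <+: s := by
  intro s
  induction s using rep.induct old with
  | case1 =>
    intro q _ h; rw [rep_nil] at h; exact h
  | case2 c t h ih =>
    intro q hq hpre
    rw [rep_step old new c t h.1 (List.isPrefixOf_iff_prefix.mp h.2)] at hpre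
    match q, hpre with
    | [], _ => exact List.nil_prefix
    | x :: q', hpre =>
      exfalso
      match new, hnew with
      | m :: ms, _ =>
        have hx : x = m := by
          have h2 := hpre
          rw [List.cons_append, List.cons_prefix_cons] at h2
          exact h2.1
        exact hq m (by simp) (by simp [← hx])
  | case3 c t h ih =>
    intro q hq hpre
    rw [rep_cons_neg old new c t (fun hh => h ⟨hh.1, List.isPrefixOf_iff_prefix.mpr hh.2⟩)] at hpre
    match q, hpre with
    | [], _ => exact List.nil_prefix
    | x :: q', hpre =>
      rw [List.cons_prefix_cons] at hpre ⊢
      refine ⟨hpre.1, ih q' (fun ch hm hin => hq ch hm (by simp [hin])) hpre.2⟩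

-- the composite of A's four replaces, as pure functions
def compRep (s : List Char) : List Char :=
  rep ['&','a','m','p',';'] ['&']
    (rep ['&','q','u','o','t',';'] ['"']
      (rep ['&','g','t',';'] ['>']
        (rep ['&','l','t',';'] ['<'] s)))


theorem rep_cons_pfx (old new : List Char) (c : Char) (t : List Char)
    (hp : ¬ old <+: (c :: t)) : rep old new (c :: t) = c :: rep old new t :=
  rep_cons_neg old new c t (fun hh => hp hh.2)

theorem not_pfx (os x : List Char) (c : Char) (h : c ≠ '&') : ¬ ('&' :: os) <+: (c :: x) := by
  rw [List.cons_prefix_cons]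
  intro hh; exact absurd hh.1.symm h

-- pass a block of characters through a replace whose pattern starts with '&':
-- if the pattern does not match at the block's start and no later block char is '&', the block is copied
theorem rep_pass (os new : List Char) (pre x : List Char)
    (h0 : ¬ ('&' :: os) <+: (pre ++ x)) (hpre : ∀ c ∈ pre.tail, c ≠ '&') :
    rep ('&' :: os) new (pre ++ x) = pre ++ rep ('&' :: os) new x := by
  induction pre with
  | nil => rfl
  | cons c pre' ih =>
    rw [show ((c :: pre') ++ x : List Char) = c :: (pre' ++ x) from rfl,
        rep_cons_pfx ('&' :: os) new c (pre' ++ x) h0]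
    match pre' with
    | [] => rfl
    | d :: pre'' =>
      rw [ih (not_pfx os (pre'' ++ x) d (hpre d (by simp)))
        (fun e he => hpre e (by simp [List.mem_cons] at he ⊢; tauto))]
      rfl

theorem main_chars (s : List Char) : compRep s = unescGo s := by
  induction s using unescGo.induct with
  | case1 => simp [compRep, rep_nil, unescGo]
  | case2 t h ih =>
    obtain ⟨r, hr⟩ := List.isPrefixOf_iff_prefix.mp h
    obtain rfl : t = 'l'::'t'::';'::r := by simpa using hr.symm
    simp only [List.drop_succ_cons, List.drop_zero] at ih
    rw [unescGo]
    simp only [h, if_pos, if_true, List.drop_succ_cons, List.drop_zero]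
    have e1 := rep_pref ['&','l','t',';'] ['<'] r (by simp)
    simp only [List.singleton_append] at e1
    unfold compRep
    rw [show ('&'::'l'::'t'::';'::r) = ['&','l','t',';'] ++ r from rfl, e1,
        rep_cons_pfx ['&','g','t',';'] ['>'] '<' _ (not_pfx _ _ _ (by simp)),
        rep_cons_pfx ['&','q','u','o','t',';'] ['"'] '<' _ (not_pfx _ _ _ (by simp)),
        rep_cons_pfx ['&','a','m','p',';'] ['&'] '<' _ (not_pfx _ _ _ (by simp))]
    exact congrArg (List.cons '<') ih
  | case3 t h1 h2 ih =>
    obtain ⟨r, hr⟩ := List.isPrefixOf_iff_prefix.mp h2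
    obtain rfl : t = 'g'::'t'::';'::r := by simpa using hr.symm
    simp only [List.drop_succ_cons, List.drop_zero] at ih
    rw [unescGo]
    simp only [h1, h2, if_pos, if_true, if_neg, if_false, List.drop_succ_cons, List.drop_zero]
    have e1 := rep_pass ['l','t',';'] ['<'] ['&','g','t',';'] r
      (by simp [List.cons_prefix_cons]) (by intro c hc; fin_cases hc <;> simp)
    have e2 := rep_pref ['&','g','t',';'] ['>'] (rep ['&','l','t',';'] ['<'] r) (by simp)
    simp only [List.singleton_append] at e2
    unfold compRep
    rw [show ('&'::'g'::'t'::';'::r) = ['&','g','t',';'] ++ r from rfl, e1,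
        show (['&','g','t',';'] ++ rep ['&','l','t',';'] ['<'] r : List Char)
           = ['&','g','t',';'] ++ rep ['&','l','t',';'] ['<'] r from rfl, e2,
        rep_cons_pfx ['&','q','u','o','t',';'] ['"'] '>' _ (not_pfx _ _ _ (by simp)),
        rep_cons_pfx ['&','a','m','p',';'] ['&'] '>' _ (not_pfx _ _ _ (by simp))]
    exact congrArg (List.cons '>') ih
  | case4 t h1 h2 h3 ih =>
    obtain ⟨r, hr⟩ := List.isPrefixOf_iff_prefix.mp h3
    obtain rfl : t = 'q'::'u'::'o'::'t'::';'::r := by simpa using hr.symm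
    simp only [List.drop_succ_cons, List.drop_zero] at ih
    rw [unescGo]
    simp only [h1, h2, h3, if_pos, if_true, if_neg, if_false, List.drop_succ_cons, List.drop_zero]
    have e1 := rep_pass ['l','t',';'] ['<'] ['&','q','u','o','t',';'] r
      (by simp [List.cons_prefix_cons]) (by intro c hc; fin_cases hc <;> simp)
    have e2 := rep_pass ['g','t',';'] ['>'] ['&','q','u','o','t',';'] (rep ['&','l','t',';'] ['<'] r)
      (by simp [List.cons_prefix_cons]) (by intro c hc; fin_cases hc <;> simp)
    have e3 := rep_pref ['&','q','u','o','t',';'] ['"']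
      (rep ['&','g','t',';'] ['>'] (rep ['&','l','t',';'] ['<'] r)) (by simp)
    simp only [List.singleton_append] at e3
    unfold compRep
    rw [show ('&'::'q'::'u'::'o'::'t'::';'::r) = ['&','q','u','o','t',';'] ++ r from rfl, e1, e2, e3,
        rep_cons_pfx ['&','a','m','p',';'] ['&'] '"' _ (not_pfx _ _ _ (by simp))]
    exact congrArg (List.cons '"') ih
  | case5 t h1 h2 h3 h4 ih =>
    obtain ⟨r, hr⟩ := List.isPrefixOf_iff_prefix.mp h4
    obtain rfl : t = 'a'::'m'::'p'::';'::r := by simpa using hr.symm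
    simp only [List.drop_succ_cons, List.drop_zero] at ih
    rw [unescGo]
    simp only [h1, h2, h3, h4, if_pos, if_true, if_neg, if_false, List.drop_succ_cons, List.drop_zero]
    have e1 := rep_pass ['l','t',';'] ['<'] ['&','a','m','p',';'] r
      (by simp [List.cons_prefix_cons]) (by intro c hc; fin_cases hc <;> simp)
    have e2 := rep_pass ['g','t',';'] ['>'] ['&','a','m','p',';'] (rep ['&','l','t',';'] ['<'] r)
      (by simp [List.cons_prefix_cons]) (by intro c hc; fin_cases hc <;> simp)
    have e3 := rep_pass ['q','u','o','t',';'] ['"'] ['&','a','m','p',';']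
      (rep ['&','g','t',';'] ['>'] (rep ['&','l','t',';'] ['<'] r))
      (by simp [List.cons_prefix_cons]) (by intro c hc; fin_cases hc <;> simp)
    have e4 := rep_pref ['&','a','m','p',';'] ['&']
      (rep ['&','q','u','o','t',';'] ['"'] (rep ['&','g','t',';'] ['>'] (rep ['&','l','t',';'] ['<'] r))) (by simp)
    simp only [List.singleton_append] at e4
    unfold compRep
    rw [show ('&'::'a'::'m'::'p'::';'::r) = ['&','a','m','p',';'] ++ r from rfl, e1, e2, e3, e4]
    exact congrArg (List.cons '&') ih
  | case6 t h1 h2 h3 h4 ih =>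
    rw [unescGo]
    simp only [h1, h2, h3, h4, if_pos, if_true, if_neg, if_false]
    have hp1 : ¬ ['&','l','t',';'] <+: ('&' :: t) := fun hh => h1 (List.isPrefixOf_iff_prefix.mpr hh)
    have pbGT : ¬ ['&','g','t',';'] <+: ('&' :: rep ['&','l','t',';'] ['<'] t) := by
      rw [List.cons_prefix_cons]
      rintro ⟨-, hpre⟩
      apply h2
      rw [List.isPrefixOf_iff_prefix, List.cons_prefix_cons]
      exact ⟨rfl, rep_prefix_pullback _ _ (by simp) _ _ (by intro ch hc; fin_cases hc <;> simp) hpre⟩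
    have pbQU : ¬ ['&','q','u','o','t',';'] <+:
        ('&' :: rep ['&','g','t',';'] ['>'] (rep ['&','l','t',';'] ['<'] t)) := by
      rw [List.cons_prefix_cons]
      rintro ⟨-, hpre⟩
      apply h3
      rw [List.isPrefixOf_iff_prefix, List.cons_prefix_cons]
      exact ⟨rfl, rep_prefix_pullback _ _ (by simp) _ _ (by intro ch hc; fin_cases hc <;> simp)
        (rep_prefix_pullback _ _ (by simp) _ _ (by intro ch hc; fin_cases hc <;> simp) hpre)⟩
    have pbAMP : ¬ ['&','a','m','p',';'] <+:
        ('&' :: rep ['&','q','u','o','t',';'] ['"']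
          (rep ['&','g','t',';'] ['>'] (rep ['&','l','t',';'] ['<'] t))) := by
      rw [List.cons_prefix_cons]
      rintro ⟨-, hpre⟩
      apply h4
      rw [List.isPrefixOf_iff_prefix, List.cons_prefix_cons]
      exact ⟨rfl, rep_prefix_pullback _ _ (by simp) _ _ (by intro ch hc; fin_cases hc <;> simp)
        (rep_prefix_pullback _ _ (by simp) _ _ (by intro ch hc; fin_cases hc <;> simp)
          (rep_prefix_pullback _ _ (by simp) _ _ (by intro ch hc; fin_cases hc <;> simp) hpre))⟩
    unfold compRep
    rw [rep_cons_pfx ['&','l','t',';'] ['<'] '&' t hp1,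
        rep_cons_pfx ['&','g','t',';'] ['>'] '&' _ pbGT,
        rep_cons_pfx ['&','q','u','o','t',';'] ['"'] '&' _ pbQU,
        rep_cons_pfx ['&','a','m','p',';'] ['&'] '&' _ pbAMP]
    exact congrArg (List.cons '&') ih
  | case7 c t hc ih =>
    rw [unescGo]
    simp only [hc, if_neg, if_false]
    unfold compRep
    rw [rep_cons_pfx ['&','l','t',';'] ['<'] c t (not_pfx _ _ _ hc),
        rep_cons_pfx ['&','g','t',';'] ['>'] c _ (not_pfx _ _ _ hc),
        rep_cons_pfx ['&','q','u','o','t',';'] ['"'] c _ (not_pfx _ _ _ hc),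
        rep_cons_pfx ['&','a','m','p',';'] ['&'] c _ (not_pfx _ _ _ hc)]
    exact congrArg (List.cons c) ih

-- ===== VERDICT (by name: the statement is the Claim_ definition above) =====
theorem url_unescape_spec : Claim_equal_url_unescape := by
  intro url _
  unfold Spec_url_unescape
  have hA : url_unescape url =
      PySem.Str.replace (PySem.Str.replace (PySem.Str.replace
        (PySem.Str.replace url "&lt;" "<") "&gt;" ">") "&quot;" "\"") "&amp;" "&" := rfl
  rw [hA]
  unfold url_unescape_alt
  rw [← main_chars]
  unfold compRep
  simp only [PySem.Str.replace, String.toList_ofList]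
  rw [replace_eq_rep _ _ _ (by decide), replace_eq_rep _ _ _ (by decide),
      replace_eq_rep _ _ _ (by decide), replace_eq_rep _ _ _ (by decide)]
  rfl
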